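-- pv_equiv track=rewrite | github.com/HDDLGym/HDDLGym | hddl_utils.py | enumerate_state
-- ===== SOURCE A (Python) =====
-- def enumerate_state(state, grounded_predicate_list):
--   '''
--   This function return one-hot list of state's predicates in the grounded_predicate_list
--   '''
--   num_state = []
--   for pre in grounded_predicate_list:
--     if pre in state:
--       num_state.append(1)
--     else:
--       num_state.append(0)
--   return num_state
-- ===== SOURCE B (Python) =====
-- def enumerate_state(state, grounded_predicate_list):
--     '''
--     One-hot list of grounded predicates present in state, built by scattering
--     from state through an index table instead of testing membership per predicate.
--     '''
--     pos = {}
--     for i, pre in enumerate(grounded_predicate_list):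
--         pos.setdefault(pre, []).append(i)
--     res = [0] * len(grounded_predicate_list)
--     for s in state:
--         for i in pos.get(s, []):
--             res[i] = 1
--     return res
-- ===== Notes on version B (the rewrite author's own statement) =====
-- stated objective: faster
-- what changed: Replaces the per-predicate linear membership scan over state with a one-pass index table over the grounded list plus a scatter pass over state, removing the inner scan.
import Mathlib
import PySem

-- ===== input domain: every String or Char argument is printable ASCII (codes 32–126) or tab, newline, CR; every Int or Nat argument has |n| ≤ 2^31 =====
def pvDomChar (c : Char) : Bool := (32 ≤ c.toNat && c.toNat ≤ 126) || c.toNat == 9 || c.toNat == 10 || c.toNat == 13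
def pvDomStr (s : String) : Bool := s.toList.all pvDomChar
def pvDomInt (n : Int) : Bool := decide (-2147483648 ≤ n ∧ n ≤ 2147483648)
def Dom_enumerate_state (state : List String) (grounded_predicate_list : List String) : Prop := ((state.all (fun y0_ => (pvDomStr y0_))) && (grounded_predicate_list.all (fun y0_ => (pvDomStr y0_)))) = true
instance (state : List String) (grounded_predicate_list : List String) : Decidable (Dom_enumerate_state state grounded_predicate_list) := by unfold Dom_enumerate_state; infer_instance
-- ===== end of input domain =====

-- ===== PORT A =====
-- Literal port of A: scan the grounded list, appending 1/0 per membership test in state.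
def enumerate_state (state : List String) (grounded_predicate_list : List String) : List Int :=
  grounded_predicate_list.foldl
    (fun num_state pre => num_state ++ [if pre ∈ state then (1 : Int) else 0]) []

-- ===== PORT B =====
-- Literal port of B: build an index table (predicate -> positions) in one pass, then scatter 1s from state.
def enumerate_state_alt (state : List String) (grounded_predicate_list : List String) : List Int :=
  let pos : PySem.Dict String (List Int) :=
    (PySem.List.enumerate grounded_predicate_list 0).foldl
      (fun d q => d.modify q.2 [] (· ++ [q.1])) PySem.Dict.empty
  let res : List Int := List.replicate grounded_predicate_list.length 0
  state.foldl (fun r s => (pos.getD s []).foldl (fun r i => PySem.List.pySetD r i 1) r) res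

-- ===== PRECONDITION & SPEC =====
def Spec_enumerate_state (state : List String) (grounded_predicate_list : List String) (out : List Int) : Prop := out = enumerate_state_alt state grounded_predicate_list
instance (state : List String) (grounded_predicate_list : List String) (out : List Int) : Decidable (Spec_enumerate_state state grounded_predicate_list out) := by unfold Spec_enumerate_state; infer_instance

-- ===== CLAIM (what is proved, stated in full; the proofs are below) =====
def Claim_equal_enumerate_state : Prop := ∀ (state : List String) (grounded_predicate_list : List String), Dom_enumerate_state state grounded_predicate_list → Spec_enumerate_state state grounded_predicate_list (enumerate_state state grounded_predicate_list)

-- ===== LEMMAS AND PROOFS =====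

-- A's append-per-element fold is a map.
theorem pvFoldAppendMap {α β : Type} (f : α → β) :
    ∀ (l : List α) (acc : List β), l.foldl (fun a x => a ++ [f x]) acc = acc ++ l.map f := by
  intro l
  induction l with
  | nil => simp
  | cons x xs ih => intro acc; simp [List.foldl_cons, ih]

-- The index table's lookup at s is the list of positions of s in g.
theorem pvGetDFold (s : String) (l : List (Int × String)) :
    ∀ (d : PySem.Dict String (List Int)),
      (l.foldl (fun d q => d.modify q.2 [] (· ++ [q.1])) d).getD s []
        = d.getD s [] ++ (l.filter (fun q => q.2 == s)).map (·.1) := by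
  induction l with
  | nil => intro d; simp
  | cons q tl ih =>
    intro d
    rw [List.foldl_cons, ih, PySem.Dict.getD_modify]
    by_cases h : q.2 = s
    · simp [h.symm]
    · simp [h, Ne.symm h]

theorem pvPosGetD (g : List String) (s : String) :
    ((PySem.List.enumerate g 0).foldl (fun d q => d.modify q.2 [] (· ++ [q.1]))
        (PySem.Dict.empty : PySem.Dict String (List Int))).getD s []
      = ((PySem.List.enumerate g 0).filter (fun q => q.2 == s)).map (·.1) := by
  rw [pvGetDFold]; simp

-- Membership in the position list of s.
theorem pvMemPos (g : List String) (s : String) (i : Int) :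
    (i ∈ ((PySem.List.enumerate g 0).filter (fun q => q.2 == s)).map (·.1)) ↔
      ∃ k : Nat, ∃ _ : k < g.length, i = (k : Int) ∧ g[k] = s := by
  simp only [List.mem_map, List.mem_filter, PySem.List.mem_enumerate_iff]
  constructor
  · rintro ⟨⟨a, b⟩, ⟨⟨k, hk, hp⟩, hb⟩, hi⟩
    obtain ⟨rfl, rfl⟩ := Prod.mk.injEq .. ▸ hp
    exact ⟨k, hk, by simpa using hi.symm, by simpa using hb⟩
  · rintro ⟨k, hk, rfl, hs⟩
    exact ⟨((k : Int), g[k]), ⟨⟨k, hk, by simp⟩, by simpa using hs⟩, rfl⟩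

-- Scattering 1s at the in-range positions l: pointwise description.
theorem pvScatter (l : List Int) :
    ∀ (r : List Int), (∀ i ∈ l, 0 ≤ i ∧ i.toNat < r.length) →
      (l.foldl (fun r i => PySem.List.pySetD r i 1) r).length = r.length ∧
      ∀ j : Nat, (l.foldl (fun r i => PySem.List.pySetD r i 1) r)[j]? =
        if (j : Int) ∈ l then some 1 else r[j]? := by
  induction l with
  | nil => intro r _; simp
  | cons i tl ih =>
    intro r hb
    obtain ⟨hi0, hilt⟩ := hb i (List.mem_cons_self ..)
    have hset : PySem.List.pySetD r i 1 = r.set i.toNat 1 :=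
      PySem.List.pySetD_of_nonneg r 1 hi0
    have hlen : (PySem.List.pySetD r i 1).length = r.length := by
      rw [hset]; simp
    obtain ⟨ihlen, ihget⟩ := ih (PySem.List.pySetD r i 1)
      (fun x hx => by rw [hlen]; exact hb x (List.mem_cons_of_mem _ hx))
    refine ⟨by simp [List.foldl_cons, ihlen, hlen], fun j => ?_⟩
    rw [List.foldl_cons, ihget j, hset]
    by_cases htl : (j : Int) ∈ tl
    · simp [htl]
    · by_cases hji : (j : Int) = i
      · have : i.toNat = j := by omega
        simp [hji, this, List.getElem?_set]
        omega
      · have hne : i.toNat ≠ j := by omega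
        simp [htl, hji, hne]

-- Scattering over the whole state: pointwise description of the outer fold.
theorem pvScatterState (g : List String) (st : List String) :
    ∀ (r : List Int), r.length = g.length →
      (st.foldl (fun r s =>
          (((PySem.List.enumerate g 0).foldl (fun d q => d.modify q.2 [] (· ++ [q.1]))
              (PySem.Dict.empty : PySem.Dict String (List Int))).getD s []).foldl
            (fun r i => PySem.List.pySetD r i 1) r) r).length = g.length ∧
      ∀ (j : Nat) (hj : j < g.length),
        (st.foldl (fun r s =>
            (((PySem.List.enumerate g 0).foldl (fun d q => d.modify q.2 [] (· ++ [q.1]))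
                (PySem.Dict.empty : PySem.Dict String (List Int))).getD s []).foldl
              (fun r i => PySem.List.pySetD r i 1) r) r)[j]? =
          if g[j]'hj ∈ st then some 1 else r[j]? := by
  induction st with
  | nil => intro r hr; simp [hr]
  | cons s rest ih =>
    intro r hr
    have hpos : ((PySem.List.enumerate g 0).foldl (fun d q => d.modify q.2 [] (· ++ [q.1]))
        (PySem.Dict.empty : PySem.Dict String (List Int))).getD s []
        = ((PySem.List.enumerate g 0).filter (fun q => q.2 == s)).map (·.1) := pvPosGetD g s
    have hbnd : ∀ i ∈ ((PySem.List.enumerate g 0).foldl (fun d q => d.modify q.2 [] (· ++ [q.1]))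
        (PySem.Dict.empty : PySem.Dict String (List Int))).getD s [], 0 ≤ i ∧ i.toNat < r.length := by
      intro i hi
      rw [hpos] at hi
      obtain ⟨k, hk, rfl, _⟩ := (pvMemPos g s i).mp hi
      constructor <;> omega
    obtain ⟨slen, sget⟩ := pvScatter _ r hbnd
    obtain ⟨ilen, iget⟩ := ih _ (slen.trans hr)
    refine ⟨by simpa using ilen, fun j hj => ?_⟩
    rw [List.foldl_cons, iget j hj, sget j]
    have hmem : ((j : Int) ∈ ((PySem.List.enumerate g 0).foldl (fun d q => d.modify q.2 [] (· ++ [q.1]))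
        (PySem.Dict.empty : PySem.Dict String (List Int))).getD s []) ↔ g[j]'(by omega) = s := by
      rw [hpos, pvMemPos]
      constructor
      · rintro ⟨k, hk, hkj, hks⟩
        have : k = j := by omega
        subst this; exact hks
      · intro h; exact ⟨j, by omega, rfl, h⟩
    by_cases hrest : g[j]'(by omega) ∈ rest
    · simp [hrest]
    · by_cases hs : g[j]'(by omega) = s
      · simp [hs, hmem.mpr hs]
      · have : ¬ ((j : Int) ∈ ((PySem.List.enumerate g 0).foldl (fun d q => d.modify q.2 [] (· ++ [q.1]))
            (PySem.Dict.empty : PySem.Dict String (List Int))).getD s []) := fun h => hs (hmem.mp h)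
        simp [hrest, hs, this]

theorem pvAltGet (state g : List String) (j : Nat) :
    (enumerate_state_alt state g)[j]? =
      if h : j < g.length then some (if g[j] ∈ state then (1 : Int) else 0) else none := by
  unfold enumerate_state_alt
  obtain ⟨hlen, hget⟩ := pvScatterState g state (List.replicate g.length 0) (by simp)
  by_cases h : j < g.length
  · rw [hget j h]
    by_cases hm : g[j]'(by omega) ∈ state <;> simp [h, hm]
  · simp only [dif_neg h]
    exact List.getElem?_eq_none (by rw [hlen]; omega)

-- ===== VERDICT (by name: the statement is the Claim_ definition above) =====
theorem enumerate_state_spec : Claim_equal_enumerate_state := by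
  intro state g _
  unfold Spec_enumerate_state
  have hA : enumerate_state state g = g.map (fun p => if p ∈ state then (1 : Int) else 0) := by
    unfold enumerate_state
    simpa using pvFoldAppendMap (fun p => if p ∈ state then (1 : Int) else 0) g []
  apply List.ext_getElem?
  intro j
  rw [hA, pvAltGet, List.getElem?_map]
  by_cases h : j < g.length
  · simp [h]
  · simp [h]
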